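-- pv_equiv track=rewrite | github.com/yakunitatta-senko/Poketwo-Helper | bot/utils/cogs/pokemon.py | convert_regional_name
-- ===== SOURCE A (Python) =====
-- def convert_regional_name(name: str) -> str:
--     region_map = {
--         "alolan": "-alola",
--         "galarian": "-galar",
--         "hisuian": "-hisui",
--         "paldean": "-paldea"
--     }
--     name_lower = name.lower().strip()
--     for prefix, suffix in region_map.items():
--         if name_lower.startswith(f"{prefix} "):
--             base_name = name_lower[len(prefix) + 1:]
--             return base_name + suffix
--     return name_lower
-- ===== SOURCE B (Python) =====
-- def convert_regional_name(name: str) -> str: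
--     # Build a DFA (flat trie transition table) over the region prefixes once,
--     # then run the normalized name through it character by character.
--     prefixes = (("alolan", "-alola"), ("galarian", "-galar"),
--                 ("hisuian", "-hisui"), ("paldean", "-paldea"))
--     trans = {}
--     accept = {}
--     next_state = 1
--     for prefix, suffix in prefixes:
--         state = 0
--         for ch in prefix:
--             key = (state, ch)
--             if key not in trans:
--                 trans[key] = next_state
--                 next_state += 1
--             state = trans[key]
--         accept[state] = suffix
--     s = name.lower().strip()
--     state = 0
--     for i, ch in enumerate(s):
--         if ch == " ":
--             if state in accept:
--                 return s[i + 1:] + accept[state]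
--             break
--         nxt = trans.get((state, ch))
--         if nxt is None:
--             break
--         state = nxt
--     return s
-- ===== Notes on version B (the rewrite author's own statement) =====
-- stated objective: alternative
-- what changed: B builds a trie of the region prefixes as a flat DFA transition table and runs the normalized name through it character by character, instead of A's loop of startswith checks over whole prefixes.
import Mathlib
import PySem

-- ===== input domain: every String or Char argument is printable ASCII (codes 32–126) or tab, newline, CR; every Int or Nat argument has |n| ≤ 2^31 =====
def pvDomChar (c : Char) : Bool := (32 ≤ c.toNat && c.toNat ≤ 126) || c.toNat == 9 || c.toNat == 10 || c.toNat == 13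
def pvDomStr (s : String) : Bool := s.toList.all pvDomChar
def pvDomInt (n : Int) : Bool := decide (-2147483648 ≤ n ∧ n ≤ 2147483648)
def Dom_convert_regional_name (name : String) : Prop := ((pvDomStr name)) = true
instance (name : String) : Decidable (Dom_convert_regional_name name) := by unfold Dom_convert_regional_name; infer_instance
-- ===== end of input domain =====

-- B replaces A's startswith scan over whole prefixes by a DFA (flat trie transition
-- table) built once from the region prefixes and run over the normalized name one
-- character at a time (alternative algorithm, same return value; A raises nowhere).

-- ===== PORT A =====
-- the for-loop over region_map.items(): first prefix whose "prefix " starts name_lower wins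
def convertLoopA (nameLower : String) : List (String × String) → String
  | [] => nameLower
  | (pre, suf) :: rest =>
    if PySem.Str.startswith nameLower (pre ++ " ") then
      PySem.Str.slice nameLower (some (PySem.Str.len pre + 1)) none ++ suf
    else convertLoopA nameLower rest

def convert_regional_name (name : String) : String :=
  let regionMap : PySem.Dict String String :=
    PySem.Dict.mk [("alolan", "-alola"), ("galarian", "-galar"), ("hisuian", "-hisui"), ("paldean", "-paldea")]
  let nameLower := PySem.Str.strip (PySem.Str.lower name)
  convertLoopA nameLower regionMap.items

-- ===== PORT B =====
-- the two build loops: for each (prefix, suffix), walk/extend the transition table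
-- from state 0 over the prefix's characters, then mark the final state accepting
def pvBuildDFA : PySem.Dict (Int × Char) Int × PySem.Dict Int String × Int :=
  ([("alolan", "-alola"), ("galarian", "-galar"), ("hisuian", "-hisui"), ("paldean", "-paldea")] :
      List (String × String)).foldl
    (fun acc p =>
      let inner := p.1.toList.foldl
        (fun (st : PySem.Dict (Int × Char) Int × Int × Int) ch =>
          if st.1.contains (st.2.1, ch) then
            (st.1, st.1.getD (st.2.1, ch) 0, st.2.2)
          else
            let t := st.1.insert (st.2.1, ch) st.2.2
            (t, t.getD (st.2.1, ch) 0, st.2.2 + 1))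
        (acc.1, 0, acc.2.2)
      (inner.1, acc.2.1.insert inner.2.1 p.2, inner.2.2))
    (PySem.Dict.empty, PySem.Dict.empty, 1)

-- the scan loop: 'for i, ch in enumerate(s)' with state, break ↦ return s
def pvWalk (trans : PySem.Dict (Int × Char) Int) (accept : PySem.Dict Int String) (s : String) :
    List Char → Int → Int → String
  | [], _, _ => s
  | ch :: rest, i, state =>
    if ch = ' ' then
      match accept.get? state with
      | some suf => PySem.Str.slice s (some (i + 1)) none ++ suf
      | none => s
    else
      match trans.get? (state, ch) with
      | some nxt => pvWalk trans accept s rest (i + 1) nxt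
      | none => s

def convert_regional_name_alt (name : String) : String :=
  let d := pvBuildDFA
  let s := PySem.Str.strip (PySem.Str.lower name)
  pvWalk d.1 d.2.1 s s.toList 0 0

-- ===== PRECONDITION & SPEC =====
def Spec_convert_regional_name (name : String) (out : String) : Prop := out = convert_regional_name_alt name
instance (name : String) (out : String) : Decidable (Spec_convert_regional_name name out) := by unfold Spec_convert_regional_name; infer_instance

-- ===== CLAIM (what is proved, stated in full; the proofs are below) =====
def Claim_equal_convert_regional_name : Prop := ∀ (name : String), Dom_convert_regional_name name → Spec_convert_regional_name name (convert_regional_name name)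

-- ===== LEMMAS AND PROOFS =====

-- the DFA pvBuildDFA evaluates to, as literals
def pvT : PySem.Dict (Int × Char) Int := PySem.Dict.mk [((0, 'a'), 1), ((1, 'l'), 2), ((2, 'o'), 3), ((3, 'l'), 4), ((4, 'a'), 5), ((5, 'n'), 6), ((0, 'g'), 7), ((7, 'a'), 8), ((8, 'l'), 9), ((9, 'a'), 10), ((10, 'r'), 11), ((11, 'i'), 12), ((12, 'a'), 13), ((13, 'n'), 14), ((0, 'h'), 15), ((15, 'i'), 16), ((16, 's'), 17), ((17, 'u'), 18), ((18, 'i'), 19), ((19, 'a'), 20), ((20, 'n'), 21), ((0, 'p'), 22), ((22, 'a'), 23), ((23, 'l'), 24), ((24, 'd'), 25), ((25, 'e'), 26), ((26, 'a'), 27), ((27, 'n'), 28)]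
def pvAcc : PySem.Dict Int String := PySem.Dict.mk [(6, "-alola"), (14, "-galar"), (21, "-hisui"), (28, "-paldea")]

lemma build_eq : pvBuildDFA = (pvT, pvAcc, 29) := by decide

-- a linear chain of the DFA: from state st the table matches exactly the chars of ps in
-- order (each non-space), only the final state is accepting (with suffix suf), and the
-- final state has no outgoing transitions
def ChainOK (T : PySem.Dict (Int × Char) Int) (A : PySem.Dict Int String) (suf : String) :
    Int → List (Char × Int) → Prop
  | st, [] => A.get? st = some suf ∧ ∀ c, T.get? (st, c) = none
  | st, p :: rest =>
      A.get? st = none ∧ (∀ c, T.get? (st, c) = if c = p.1 then some p.2 else none) ∧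
      p.1 ≠ ' ' ∧ ChainOK T A suf p.2 rest

-- walking a chain returns the suffixed slice iff the chain's word plus a space prefixes
-- the remaining characters
lemma chain_walk (T : PySem.Dict (Int × Char) Int) (A : PySem.Dict Int String) (suf s : String) :
    ∀ (ps : List (Char × Int)) (l : List Char) (st : Int) (i : Int),
      ChainOK T A suf st ps →
      pvWalk T A s l i st =
        if (ps.map Prod.fst ++ [' ']) <+: l then
          PySem.Str.slice s (some (i + (ps.length : Int) + 1)) none ++ suf
        else s := by
  intro ps
  induction ps with
  | nil =>
    intro l st i h
    obtain ⟨hA, hT⟩ := h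
    cases l with
    | nil => simp [pvWalk]
    | cons c rest =>
      by_cases hc : c = ' '
      · subst hc
        simp [pvWalk, hA, List.cons_prefix_cons]
      · simp only [pvWalk, if_neg hc, hT c]
        rw [if_neg (by simp [List.cons_prefix_cons]; intro h; exact absurd h.symm hc)]
  | cons p ps ih =>
    intro l st i h
    obtain ⟨hA, hT, hsp, hrest⟩ := h
    cases l with
    | nil => simp [pvWalk]
    | cons c rest =>
      by_cases hc : c = ' '
      · subst hc
        simp [pvWalk, hA, List.cons_prefix_cons, hsp]
      · by_cases hcc : c = p.1
        · subst hcc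
          have harith : (i + 1) + (ps.length : Int) + 1 = i + ((ps.length : Nat) + 1 : Int) + 1 := by ring
          simp only [pvWalk, if_neg hc, hT p.1, if_true]
          rw [ih rest p.2 (i + 1) hrest, harith]
          simp [List.cons_prefix_cons]
        · simp only [pvWalk, if_neg hc, hT c, if_neg hcc]
          rw [if_neg (by simp [List.cons_prefix_cons]; intro h; exact absurd h.symm hcc)]

-- startswith on a cons: head mismatch fails, equal heads peel off
lemma sw_head_ne {x c : Char} (h : x ≠ c) (rest ps : List Char) :
    PySem.Chars.startswith (c :: rest) (x :: ps) = false := by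
  rw [Bool.eq_false_iff]
  intro hT
  obtain ⟨t, ht⟩ := (PySem.Chars.startswith_iff _ _).mp hT
  exact h (by injection ht)

lemma sw_head_eq (c : Char) (rest ps : List Char) :
    PySem.Chars.startswith (c :: rest) (c :: ps) = PySem.Chars.startswith rest ps := by
  cases h : PySem.Chars.startswith rest ps with
  | true =>
    rw [PySem.Chars.startswith_iff]
    exact List.cons_prefix_cons.mpr ⟨rfl, (PySem.Chars.startswith_iff _ _).mp h⟩
  | false =>
    rw [Bool.eq_false_iff]
    intro hT
    rw [Bool.eq_false_iff] at h
    exact h ((PySem.Chars.startswith_iff _ _).mpr (List.cons_prefix_cons.mp ((PySem.Chars.startswith_iff _ _).mp hT)).2)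

-- the four ChainOK facts for pvT/pvAcc (one per region prefix, entered after its first char)
lemma ck_alolan : ChainOK pvT pvAcc "-alola" 1 [('l', 2), ('o', 3), ('l', 4), ('a', 5), ('n', 6)] := by
  simp only [ChainOK]
  repeat' apply And.intro
  all_goals first
    | (intro c
       simp only [pvT, PySem.Dict.get?_mk_cons, beq_iff_eq, Prod.mk.injEq]
       norm_num
       try simp [PySem.Dict.get?, List.find?, @eq_comm Char])
    | decide

lemma ck_galarian : ChainOK pvT pvAcc "-galar" 7 [('a', 8), ('l', 9), ('a', 10), ('r', 11), ('i', 12), ('a', 13), ('n', 14)] := by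
  simp only [ChainOK]
  repeat' apply And.intro
  all_goals first
    | (intro c
       simp only [pvT, PySem.Dict.get?_mk_cons, beq_iff_eq, Prod.mk.injEq]
       norm_num
       try simp [PySem.Dict.get?, List.find?, @eq_comm Char])
    | decide

lemma ck_hisuian : ChainOK pvT pvAcc "-hisui" 15 [('i', 16), ('s', 17), ('u', 18), ('i', 19), ('a', 20), ('n', 21)] := by
  simp only [ChainOK]
  repeat' apply And.intro
  all_goals first
    | (intro c
       simp only [pvT, PySem.Dict.get?_mk_cons, beq_iff_eq, Prod.mk.injEq]
       norm_num
       try simp [PySem.Dict.get?, List.find?, @eq_comm Char])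
    | decide

lemma ck_paldean : ChainOK pvT pvAcc "-paldea" 22 [('a', 23), ('l', 24), ('d', 25), ('e', 26), ('a', 27), ('n', 28)] := by
  simp only [ChainOK]
  repeat' apply And.intro
  all_goals first
    | (intro c
       simp only [pvT, PySem.Dict.get?_mk_cons, beq_iff_eq, Prod.mk.injEq]
       norm_num
       try simp [PySem.Dict.get?, List.find?, @eq_comm Char])
    | decide

-- the root state's transitions
lemma root_trans (c : Char) :
    pvT.get? (0, c) = if c = 'a' then some 1 else if c = 'g' then some 7
      else if c = 'h' then some 15 else if c = 'p' then some 22 else none := by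
  simp only [pvT, PySem.Dict.get?_mk_cons, beq_iff_eq, Prod.mk.injEq]
  norm_num
  simp [PySem.Dict.get?, List.find?, @eq_comm Char]

-- the two algorithms agree on any (already normalized) string
lemma main_eq (nl : String) :
    convertLoopA nl [("alolan", "-alola"), ("galarian", "-galar"), ("hisuian", "-hisui"), ("paldean", "-paldea")] =
      pvWalk pvT pvAcc nl nl.toList 0 0 := by
  have hsw : ∀ p : String, PySem.Str.startswith nl p = PySem.Chars.startswith nl.toList p.toList := by
    intro p; simp
  cases hl : nl.toList with
  | nil =>
    simp only [convertLoopA, hsw, hl, pvWalk]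
    rw [if_neg (by decide), if_neg (by decide), if_neg (by decide), if_neg (by decide)]
  | cons c rest =>
    simp only [convertLoopA, hsw, hl]
    by_cases ha : c = 'a'
    · subst ha
      rw [show ("alolan" ++ " " : String).toList = 'a' :: ['l', 'o', 'l', 'a', 'n', ' '] from rfl,
          sw_head_eq _ _ _,
          show ("galarian" ++ " " : String).toList = 'g' :: ['a', 'l', 'a', 'r', 'i', 'a', 'n', ' '] from rfl,
          sw_head_ne (by decide) _ _,
          show ("hisuian" ++ " " : String).toList = 'h' :: ['i', 's', 'u', 'i', 'a', 'n', ' '] from rfl,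
          sw_head_ne (by decide) _ _,
          show ("paldean" ++ " " : String).toList = 'p' :: ['a', 'l', 'd', 'e', 'a', 'n', ' '] from rfl,
          sw_head_ne (by decide) _ _]
      rw [show pvWalk pvT pvAcc nl ('a' :: rest) 0 0 = pvWalk pvT pvAcc nl rest 1 1 from by simp [pvWalk, root_trans]]
      rw [chain_walk pvT pvAcc "-alola" nl [('l', 2), ('o', 3), ('l', 4), ('a', 5), ('n', 6)] rest 1 1 ck_alolan]
      simp only [List.map_cons, List.map_nil, List.length_cons, List.length_nil]
      by_cases hp : ['l', 'o', 'l', 'a', 'n', ' '] <+: rest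
      · rw [if_pos ((PySem.Chars.startswith_iff _ _).mpr hp),
            if_pos (show ['l', 'o', 'l', 'a', 'n'] ++ [' '] <+: rest by simpa using hp)]
        norm_num [PySem.Str.len, PySem.Chars.len, show (("alolan".length : Int) + 1) = 7 from by decide]
      · rw [if_neg (show ¬(PySem.Chars.startswith rest ['l', 'o', 'l', 'a', 'n', ' '] = true) from fun hh => hp ((PySem.Chars.startswith_iff _ _).mp hh)),
            if_neg (show ¬(['l', 'o', 'l', 'a', 'n'] ++ [' '] <+: rest) by simpa using hp)]
        simp
    · by_cases hg : c = 'g'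
      · subst hg
        rw [show ("alolan" ++ " " : String).toList = 'a' :: ['l', 'o', 'l', 'a', 'n', ' '] from rfl,
            sw_head_ne (by decide) _ _,
            show ("galarian" ++ " " : String).toList = 'g' :: ['a', 'l', 'a', 'r', 'i', 'a', 'n', ' '] from rfl,
            sw_head_eq _ _ _,
            show ("hisuian" ++ " " : String).toList = 'h' :: ['i', 's', 'u', 'i', 'a', 'n', ' '] from rfl,
            sw_head_ne (by decide) _ _,
            show ("paldean" ++ " " : String).toList = 'p' :: ['a', 'l', 'd', 'e', 'a', 'n', ' '] from rfl,
            sw_head_ne (by decide) _ _]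
        rw [show pvWalk pvT pvAcc nl ('g' :: rest) 0 0 = pvWalk pvT pvAcc nl rest 1 7 from by simp [pvWalk, root_trans]]
        rw [chain_walk pvT pvAcc "-galar" nl [('a', 8), ('l', 9), ('a', 10), ('r', 11), ('i', 12), ('a', 13), ('n', 14)] rest 7 1 ck_galarian]
        simp only [List.map_cons, List.map_nil, List.length_cons, List.length_nil]
        by_cases hp : ['a', 'l', 'a', 'r', 'i', 'a', 'n', ' '] <+: rest
        · rw [if_pos ((PySem.Chars.startswith_iff _ _).mpr hp),
              if_pos (show ['a', 'l', 'a', 'r', 'i', 'a', 'n'] ++ [' '] <+: rest by simpa using hp)]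
          norm_num [PySem.Str.len, PySem.Chars.len, show (("galarian".length : Int) + 1) = 9 from by decide]
        · rw [if_neg (show ¬(PySem.Chars.startswith rest ['a', 'l', 'a', 'r', 'i', 'a', 'n', ' '] = true) from fun hh => hp ((PySem.Chars.startswith_iff _ _).mp hh)),
              if_neg (show ¬(['a', 'l', 'a', 'r', 'i', 'a', 'n'] ++ [' '] <+: rest) by simpa using hp)]
          simp
      · by_cases hh2 : c = 'h'
        · subst hh2
          rw [show ("alolan" ++ " " : String).toList = 'a' :: ['l', 'o', 'l', 'a', 'n', ' '] from rfl,
              sw_head_ne (by decide) _ _,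
              show ("galarian" ++ " " : String).toList = 'g' :: ['a', 'l', 'a', 'r', 'i', 'a', 'n', ' '] from rfl,
              sw_head_ne (by decide) _ _,
              show ("hisuian" ++ " " : String).toList = 'h' :: ['i', 's', 'u', 'i', 'a', 'n', ' '] from rfl,
              sw_head_eq _ _ _,
              show ("paldean" ++ " " : String).toList = 'p' :: ['a', 'l', 'd', 'e', 'a', 'n', ' '] from rfl,
              sw_head_ne (by decide) _ _]
          rw [show pvWalk pvT pvAcc nl ('h' :: rest) 0 0 = pvWalk pvT pvAcc nl rest 1 15 from by simp [pvWalk, root_trans]]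
          rw [chain_walk pvT pvAcc "-hisui" nl [('i', 16), ('s', 17), ('u', 18), ('i', 19), ('a', 20), ('n', 21)] rest 15 1 ck_hisuian]
          simp only [List.map_cons, List.map_nil, List.length_cons, List.length_nil]
          by_cases hp : ['i', 's', 'u', 'i', 'a', 'n', ' '] <+: rest
          · rw [if_pos ((PySem.Chars.startswith_iff _ _).mpr hp),
                if_pos (show ['i', 's', 'u', 'i', 'a', 'n'] ++ [' '] <+: rest by simpa using hp)]
            norm_num [PySem.Str.len, PySem.Chars.len, show (("hisuian".length : Int) + 1) = 8 from by decide]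
          · rw [if_neg (show ¬(PySem.Chars.startswith rest ['i', 's', 'u', 'i', 'a', 'n', ' '] = true) from fun hh => hp ((PySem.Chars.startswith_iff _ _).mp hh)),
                if_neg (show ¬(['i', 's', 'u', 'i', 'a', 'n'] ++ [' '] <+: rest) by simpa using hp)]
            simp
        · by_cases hp2 : c = 'p'
          · subst hp2
            rw [show ("alolan" ++ " " : String).toList = 'a' :: ['l', 'o', 'l', 'a', 'n', ' '] from rfl,
                sw_head_ne (by decide) _ _,
                show ("galarian" ++ " " : String).toList = 'g' :: ['a', 'l', 'a', 'r', 'i', 'a', 'n', ' '] from rfl,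
                sw_head_ne (by decide) _ _,
                show ("hisuian" ++ " " : String).toList = 'h' :: ['i', 's', 'u', 'i', 'a', 'n', ' '] from rfl,
                sw_head_ne (by decide) _ _,
                show ("paldean" ++ " " : String).toList = 'p' :: ['a', 'l', 'd', 'e', 'a', 'n', ' '] from rfl,
                sw_head_eq _ _ _]
            rw [show pvWalk pvT pvAcc nl ('p' :: rest) 0 0 = pvWalk pvT pvAcc nl rest 1 22 from by simp [pvWalk, root_trans]]
            rw [chain_walk pvT pvAcc "-paldea" nl [('a', 23), ('l', 24), ('d', 25), ('e', 26), ('a', 27), ('n', 28)] rest 22 1 ck_paldean]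
            simp only [List.map_cons, List.map_nil, List.length_cons, List.length_nil]
            by_cases hp : ['a', 'l', 'd', 'e', 'a', 'n', ' '] <+: rest
            · rw [if_pos ((PySem.Chars.startswith_iff _ _).mpr hp),
                  if_pos (show ['a', 'l', 'd', 'e', 'a', 'n'] ++ [' '] <+: rest by simpa using hp)]
              norm_num [PySem.Str.len, PySem.Chars.len, show (("paldean".length : Int) + 1) = 8 from by decide]
            · rw [if_neg (show ¬(PySem.Chars.startswith rest ['a', 'l', 'd', 'e', 'a', 'n', ' '] = true) from fun hh => hp ((PySem.Chars.startswith_iff _ _).mp hh)),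
                  if_neg (show ¬(['a', 'l', 'd', 'e', 'a', 'n'] ++ [' '] <+: rest) by simpa using hp)]
              simp
          · rw [show ("alolan" ++ " " : String).toList = 'a' :: ['l', 'o', 'l', 'a', 'n', ' '] from rfl,
                sw_head_ne (fun hh => ha hh.symm) _ _,
                show ("galarian" ++ " " : String).toList = 'g' :: ['a', 'l', 'a', 'r', 'i', 'a', 'n', ' '] from rfl,
                sw_head_ne (fun hh => hg hh.symm) _ _,
                show ("hisuian" ++ " " : String).toList = 'h' :: ['i', 's', 'u', 'i', 'a', 'n', ' '] from rfl,
                sw_head_ne (fun hh => hh2 hh.symm) _ _,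
                show ("paldean" ++ " " : String).toList = 'p' :: ['a', 'l', 'd', 'e', 'a', 'n', ' '] from rfl,
                sw_head_ne (fun hh => hp2 hh.symm) _ _]
            by_cases hsp : c = ' '
            · subst hsp
              simp [pvWalk, pvAcc, PySem.Dict.get?]
            · simp only [pvWalk, if_neg hsp, root_trans, if_neg ha, if_neg hg, if_neg hh2, if_neg hp2]
              simp

-- ===== VERDICT (by name: the statement is the Claim_ definition above) =====
theorem convert_regional_name_spec : Claim_equal_convert_regional_name := by
  intro name _
  show convert_regional_name name = convert_regional_name_alt name
  unfold convert_regional_name convert_regional_name_alt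
  rw [build_eq]
  exact main_eq _
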